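-- pv_equiv track=rewrite | github.com/goncalog01/advent-of-code | 2020/12/ex2.py | rotL
-- ===== SOURCE A (Python) =====
-- def rotL(hor_val, vert_val, times):
--     new_dir = {"vert": vert_val, "hor": hor_val}
--     while times > 0:
--         aux = new_dir["vert"] * -1
--         new_dir["vert"] = new_dir["hor"]
--         new_dir["hor"] = aux
--         times -= 1
--     return new_dir
-- ===== SOURCE B (Python) =====
-- def rotL(hor_val, vert_val, times):
--     r = times % 4 if times > 0 else 0
--     if r == 0:
--         return {"vert": vert_val, "hor": hor_val}
--     elif r == 1:
--         return {"vert": hor_val, "hor": -vert_val}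
--     elif r == 2:
--         return {"vert": -vert_val, "hor": -hor_val}
--     else:
--         return {"vert": -hor_val, "hor": vert_val}
-- ===== Notes on version B (the rewrite author's own statement) =====
-- stated objective: faster
-- what changed: Replaced the times-step decrement loop with a closed-form branch on times % 4 (rotations have period 4), clamping non-positive times to 0 as A's loop does.
import Mathlib
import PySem

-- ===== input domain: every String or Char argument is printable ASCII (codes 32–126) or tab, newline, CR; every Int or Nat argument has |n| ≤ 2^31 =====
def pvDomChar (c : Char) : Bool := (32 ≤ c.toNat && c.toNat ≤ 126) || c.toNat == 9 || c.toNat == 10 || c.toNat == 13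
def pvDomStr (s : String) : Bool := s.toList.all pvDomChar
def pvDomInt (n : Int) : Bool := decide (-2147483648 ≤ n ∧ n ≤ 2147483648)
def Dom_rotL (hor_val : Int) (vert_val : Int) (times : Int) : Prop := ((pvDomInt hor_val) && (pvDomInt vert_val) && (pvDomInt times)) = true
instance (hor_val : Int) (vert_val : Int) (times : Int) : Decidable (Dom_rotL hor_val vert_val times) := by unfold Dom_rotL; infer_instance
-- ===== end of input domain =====

-- ===== PORT A =====
-- B replaces A's decrement loop by a closed-form branch on times % 4 (period-4 rotation); objective: faster.
-- loop body of A's while: (vert, hor) ↦ (hor, -vert), times ↦ times - 1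
def rotLoop (vert_v : Int) (hor_v : Int) (times : Int) : List (String × Int) :=
  if times > 0 then rotLoop hor_v (-vert_v) (times - 1)
  else [("vert", vert_v), ("hor", hor_v)]
termination_by times.toNat
decreasing_by omega

def rotL (hor_val : Int) (vert_val : Int) (times : Int) : List (String × Int) :=
  rotLoop vert_val hor_val times

-- ===== PORT B =====
def rotL_alt (hor_val : Int) (vert_val : Int) (times : Int) : List (String × Int) :=
  let r : Int := if times > 0 then PySem.Int.mod times 4 else 0
  if r = 0 then [("vert", vert_val), ("hor", hor_val)]
  else if r = 1 then [("vert", hor_val), ("hor", -vert_val)]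
  else if r = 2 then [("vert", -vert_val), ("hor", -hor_val)]
  else [("vert", -hor_val), ("hor", vert_val)]

-- ===== PRECONDITION & SPEC =====
def Spec_rotL (hor_val : Int) (vert_val : Int) (times : Int) (out : List (String × Int)) : Prop := out = rotL_alt hor_val vert_val times
instance (hor_val : Int) (vert_val : Int) (times : Int) (out : List (String × Int)) : Decidable (Spec_rotL hor_val vert_val times out) := by unfold Spec_rotL; infer_instance

-- ===== CLAIM (what is proved, stated in full; the proofs are below) =====
def Claim_equal_rotL : Prop := ∀ (hor_val : Int) (vert_val : Int) (times : Int), Dom_rotL hor_val vert_val times → Spec_rotL hor_val vert_val times (rotL hor_val vert_val times)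

-- ===== LEMMAS AND PROOFS =====

-- ===== VERDICT (by name: the statement is the Claim_ definition above) =====
theorem rotLoop_eq (vert_v hor_v : Int) (times : Int) (h : times > 0) :
    rotLoop vert_v hor_v times = rotLoop hor_v (-vert_v) (times - 1) := by
  rw [rotLoop]; simp [h]

theorem rotLoop_period (vert_v hor_v : Int) (times : Int) (h : times ≥ 4) :
    rotLoop vert_v hor_v times = rotLoop vert_v hor_v (times - 4) := by
  rw [rotLoop_eq _ _ _ (by omega), rotLoop_eq _ _ _ (by omega),
      rotLoop_eq _ _ _ (by omega), rotLoop_eq _ _ _ (by omega)]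
  norm_num
  have : times - 1 - 1 - 1 - 1 = times - 4 := by ring
  rw [this]

theorem rotLoop_closed (vert_v hor_v : Int) (times : Int) :
    rotLoop vert_v hor_v times = rotL_alt hor_v vert_v times := by
  by_cases hp : times > 0
  · generalize hn : times.toNat = n
    induction n using Nat.strong_induction_on generalizing times with
    | _ n ih =>
      by_cases h4 : times ≥ 4
      · rw [rotLoop_period _ _ _ h4]
        by_cases hp' : times - 4 > 0
        · rw [ih (times - 4).toNat (by omega) (times - 4) hp' rfl]
          simp only [rotL_alt, PySem.Int.mod, hp, hp', if_pos]
          have : (times - 4).fmod 4 = times.fmod 4 := by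
            rw [Int.fmod_eq_emod, Int.fmod_eq_emod]; omega
          rw [this]
        · -- times = 4 (since times ≥ 4 and times - 4 ≤ 0); times % 4 = 0
          have ht : times = 4 := by omega
          subst ht
          rw [rotLoop]
          simp [rotL_alt, PySem.Int.mod]
      · -- 1 ≤ times ≤ 3: unfold the loop directly
        interval_cases times
        · rw [rotLoop_eq _ _ _ (by norm_num), rotLoop]
          simp [rotL_alt, PySem.Int.mod]
        · rw [rotLoop_eq _ _ _ (by norm_num), rotLoop_eq _ _ _ (by norm_num), rotLoop]
          norm_num
          simp [rotL_alt, PySem.Int.mod]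
        · rw [rotLoop_eq _ _ _ (by norm_num), rotLoop_eq _ _ _ (by norm_num),
              rotLoop_eq _ _ _ (by norm_num), rotLoop]
          norm_num
          simp [rotL_alt, PySem.Int.mod]
  · rw [rotLoop]
    simp [rotL_alt, hp]

theorem rotL_spec : Claim_equal_rotL := by
  intro h v t _
  unfold Spec_rotL rotL
  exact rotLoop_closed v h t
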